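-- pv_equiv track=rewrite | github.com/Kodama849/Model-adjustment-for-hypospace | boolean/boolean_benchmark.py | get_expression_depth
-- ===== SOURCE A (Python) =====
-- def get_expression_depth(expr_str: str) -> int:
--     """Calculate the depth of a Boolean expression."""
--     # Simple heuristic: count maximum nesting level of parentheses
--     max_depth = 0
--     current_depth = 0
--
--     for char in expr_str:
--         if char == '(':
--             current_depth += 1
--             max_depth = max(max_depth, current_depth)
--         elif char == ')':
--             current_depth -= 1
--
--     # Also check for operators without parentheses
--     if max_depth == 0:
--         # Count operators to estimate depth
--         expr_upper = expr_str.upper()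
--         if any(op in expr_upper for op in ['AND','OR','NOT','XOR','NOR']):
--             max_depth = 1
--
--     return max_depth
-- ===== SOURCE B (Python) =====
-- def get_expression_depth(expr_str: str) -> int:
--     """Calculate the depth of a Boolean expression."""
--     # Brute-force per-open-paren counting: the maximum nesting level is attained
--     # right after some '(' and equals (#'(' - #')') in the prefix through it,
--     # so scan each '(' position and count parens in its prefix directly.
--     max_depth = 0
--     for i, ch in enumerate(expr_str):
--         if ch == '(':
--             depth_here = expr_str.count('(', 0, i) - expr_str.count(')', 0, i) + 1
--             if depth_here > max_depth:
--                 max_depth = depth_here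
--
--     # Also check for operators without parentheses
--     if max_depth == 0:
--         expr_upper = expr_str.upper()
--         if any(op in expr_upper for op in ['AND', 'OR', 'NOT', 'XOR', 'NOR']):
--             max_depth = 1
--
--     return max_depth
-- ===== Notes on version B (the rewrite author's own statement) =====
-- stated objective: alternative
-- what changed: Replaces A's single stateful running-depth loop by a brute-force scan that, for each '(' position, counts the parentheses in that position's prefix to get the nesting level there and takes the maximum; no running depth is maintained (keyword fallback unchanged).
import Mathlib
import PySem

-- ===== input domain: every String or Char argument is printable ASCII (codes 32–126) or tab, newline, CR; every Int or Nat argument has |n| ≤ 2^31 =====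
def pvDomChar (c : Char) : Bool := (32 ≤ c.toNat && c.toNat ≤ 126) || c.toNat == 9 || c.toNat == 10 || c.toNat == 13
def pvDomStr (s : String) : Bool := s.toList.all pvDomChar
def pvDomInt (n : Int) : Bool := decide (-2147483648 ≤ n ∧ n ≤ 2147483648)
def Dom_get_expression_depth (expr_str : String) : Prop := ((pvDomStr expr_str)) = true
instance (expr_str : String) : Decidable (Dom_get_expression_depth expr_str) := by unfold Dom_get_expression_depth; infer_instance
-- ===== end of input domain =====

-- B drops A's running-depth state entirely: for each '(' it counts the parentheses in
-- that position's prefix to get the nesting level there and takes the maximum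
-- (alternative algorithm without running state; keyword fallback unchanged).

-- ===== PORT A =====
def get_expression_depth (expr_str : String) : Int :=
  -- for char in expr_str: … maintaining (max_depth, current_depth)
  let st := expr_str.toList.foldl
    (fun (p : Int × Int) ch =>
      if ch = '(' then (max p.1 (p.2 + 1), p.2 + 1)
      else if ch = ')' then (p.1, p.2 - 1)
      else p) (0, 0)
  let max_depth := st.1
  if max_depth = 0 then
    let expr_upper := PySem.Str.upper expr_str
    if ["AND", "OR", "NOT", "XOR", "NOR"].any (fun op => PySem.Str.isIn op expr_upper)
    then 1 else max_depth
  else max_depth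

-- ===== PORT B =====
def get_expression_depth_alt (expr_str : String) : Int :=
  let cs := expr_str.toList
  -- for i, ch in enumerate(expr_str): if ch == '(' … (str.count with a bound ported
  -- by hand, exactly, as List.count over the prefix take i)
  let max_depth := (PySem.List.enumerate cs 0).foldl
    (fun (b : Int) (p : Int × Char) =>
      if p.2 = '(' then
        let depth_here : Int :=
          ((cs.take p.1.toNat).count '(' : Int) - ((cs.take p.1.toNat).count ')' : Int) + 1
        if b < depth_here then depth_here else b
      else b) 0
  if max_depth = 0 then
    let expr_upper := PySem.Str.upper expr_str
    if ["AND", "OR", "NOT", "XOR", "NOR"].any (fun op => PySem.Str.isIn op expr_upper)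
    then 1 else max_depth
  else max_depth

-- ===== PRECONDITION & SPEC =====
def Spec_get_expression_depth (expr_str : String) (out : Int) : Prop := out = get_expression_depth_alt expr_str
instance (expr_str : String) (out : Int) : Decidable (Spec_get_expression_depth expr_str out) := by unfold Spec_get_expression_depth; infer_instance

-- ===== CLAIM =====
def Claim_equal_get_expression_depth : Prop := ∀ (expr_str : String), Dom_get_expression_depth expr_str → Spec_get_expression_depth expr_str (get_expression_depth expr_str)

-- ===== LEMMAS AND PROOFS =====

theorem pv_init {α : Type} (f : (Int × Int) → α → (Int × Int)) (x y : Int × Int)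
    (t : List α) (h : x = y) : (t.foldl f x).1 = (t.foldl f y).1 := by rw [h]

-- the B-side fold over the enumerated tail equals A's stateful fold, where the
-- running depth is the paren-count difference of the consumed prefix
theorem pv_key (t pre : List Char) (b : Int) :
    ((PySem.List.enumerate t (pre.length : Int)).foldl
      (fun (b : Int) (p : Int × Char) =>
        if p.2 = '(' then
          if b < (((pre ++ t).take p.1.toNat).count '(' : Int)
              - (((pre ++ t).take p.1.toNat).count ')' : Int) + 1
          then (((pre ++ t).take p.1.toNat).count '(' : Int)
              - (((pre ++ t).take p.1.toNat).count ')' : Int) + 1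
          else b
        else b) b)
    = (t.foldl
        (fun (q : Int × Int) ch =>
          if ch = '(' then (max q.1 (q.2 + 1), q.2 + 1)
          else if ch = ')' then (q.1, q.2 - 1)
          else q)
        (b, (pre.count '(' : Int) - (pre.count ')' : Int))).1 := by
  induction t generalizing pre b with
  | nil => simp [PySem.List.enumerate_nil]
  | cons ch t ih =>
    rw [PySem.List.enumerate_cons, List.foldl_cons, List.foldl_cons]
    have htake : (pre ++ ch :: t).take ((pre.length : Int)).toNat = pre := by
      simp [List.take_left']
    have hre : pre ++ ch :: t = (pre ++ [ch]) ++ t := by simp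
    have hlen : (pre.length : Int) + 1 = ((pre ++ [ch]).length : Int) := by simp
    by_cases h1 : ch = '('
    · subst h1
      simp only [reduceIte, htake]
      rw [hre, hlen, ih (pre ++ ['('])]
      refine pv_init _ _ _ _ (Prod.ext ?_ ?_)
      · simp only [max_def]
        split_ifs <;> omega
      · simp only [List.count_append, List.count_cons, List.count_nil]
        norm_num
        omega
    · by_cases h2 : ch = ')'
      · subst h2
        have hne : ((')' : Char) = '(') ↔ False := by simp
        simp only [reduceIte, hne, if_false, htake]
        rw [hre, hlen, ih (pre ++ [')'])]
        refine pv_init _ _ _ _ (Prod.ext rfl ?_)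
        simp only [List.count_append, List.count_cons, List.count_nil]
        norm_num
        omega
      · simp only [if_neg h1, if_neg h2, htake]
        rw [hre, hlen, ih (pre ++ [ch])]
        refine pv_init _ _ _ _ (Prod.ext rfl ?_)
        simp [List.count_append, h1, h2]

-- ===== VERDICT =====
theorem get_expression_depth_spec : Claim_equal_get_expression_depth := by
  intro s _
  unfold Spec_get_expression_depth
  simp only [get_expression_depth, get_expression_depth_alt]
  have h := pv_key s.toList [] 0
  simp only [List.length_nil, List.count_nil, List.nil_append, Nat.cast_zero, sub_zero] at h
  rw [h]
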